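-- pv_equiv track=rewrite | github.com/OWASP/cornucopia | scripts/convert.py | check_make_list_into_text
-- ===== SOURCE A (Python) =====
-- from typing import Any, Dict, List, Tuple, cast
-- from operator import itemgetter
-- from itertools import groupby
--
-- def check_make_list_into_text(var: List[str]) -> str:
--     if not isinstance(var, list):
--         return str(var)
--     var = group_number_ranges(var)
--     text_output = ", ".join(str(s) for s in var)
--     if not text_output.strip():
--         text_output = " - "
--
--     return text_output
--
-- def group_number_ranges(data: List[str]) -> List[str]:
--     if len(data) < 2 or len([s for s in data if not str(s).isnumeric()]):
--         return data
--     list_ranges: List[str] = []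
--     data_numbers = [int(s) for s in data]
--     for k, g in groupby(enumerate(data_numbers), lambda x: x[0] - x[1]):
--         group: List[int] = list(map(itemgetter(1), g))
--         group = list(map(int, group))
--         if group[0] == group[-1]:
--             list_ranges.append(str(group[0]))
--         else:
--             list_ranges.append(str(group[0]) + "-" + str(group[-1]))
--     return list_ranges
-- ===== SOURCE B (Python) =====
-- from typing import List
--
-- def check_make_list_into_text(var: List[str]) -> str:
--     if not isinstance(var, list):
--         return str(var)
--     text_output = ", ".join(group_number_ranges(var))
--     return text_output if text_output.strip() else " - "
--
-- def _fmt(start: int, end: int) -> str: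
--     return str(start) if start == end else str(start) + "-" + str(end)
--
-- def group_number_ranges(data: List[str]) -> List[str]:
--     if len(data) < 2 or not all(str(s).isnumeric() for s in data):
--         return data
--     nums = [int(s) for s in data]
--     out: List[str] = []
--     start = prev = nums[0]
--     for v in nums[1:]:
--         if v == prev + 1:
--             prev = v
--         else:
--             out.append(_fmt(start, prev))
--             start = prev = v
--     out.append(_fmt(start, prev))
--     return out
-- ===== Notes on version B (the rewrite author's own statement) =====
-- stated objective: simpler
-- what changed: group_number_ranges's groupby/enumerate/itemgetter pipeline is replaced by one explicit loop over the int list that maintains the current run's start and previous value and flushes a formatted run whenever the chain v == prev+1 breaks; the guard becomes a direct all(...) check.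
import Mathlib
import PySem

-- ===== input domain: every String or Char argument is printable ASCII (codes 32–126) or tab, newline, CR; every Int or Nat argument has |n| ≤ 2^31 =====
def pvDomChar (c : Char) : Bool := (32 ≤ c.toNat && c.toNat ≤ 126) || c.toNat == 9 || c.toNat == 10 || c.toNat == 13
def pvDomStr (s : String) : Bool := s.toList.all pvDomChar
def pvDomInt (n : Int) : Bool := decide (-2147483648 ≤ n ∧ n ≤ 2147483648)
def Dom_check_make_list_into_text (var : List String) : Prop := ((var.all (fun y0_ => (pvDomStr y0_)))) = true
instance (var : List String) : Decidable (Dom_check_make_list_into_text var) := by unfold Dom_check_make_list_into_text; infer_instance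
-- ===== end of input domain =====

-- B replaces the groupby/enumerate/itemgetter pipeline with a single explicit
-- run-tracking loop (start/prev accumulator flushed when the +1 chain breaks): simpler.
-- str.isnumeric() is ported as PySem.Str.strIsdigit, exact on the ASCII domain Dom.

-- ===== PORT A =====

-- enumerate(data_numbers) with Python int indices
def aEnum (i : Int) : List Int → List (Int × Int)
  | [] => []
  | v :: l => (i, v) :: aEnum (i + 1) l

-- groupby(..., lambda x: x[0] - x[1]): maximal blocks of equal key, values kept
def aGroups : List (Int × Int) → List (List Int)
  | [] => []
  | [(_, v)] => [[v]]
  | (i, v) :: (j, w) :: rest =>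
    match aGroups ((j, w) :: rest) with
    | [] => [[v]]                     -- unreachable: aGroups of a cons is a cons
    | g :: gs => if i - v = j - w then (v :: g) :: gs else [v] :: g :: gs

-- group[0] / group[-1]; groups produced by aGroups are nonempty, so headD/getLastD
-- defaults never fire (the inner list(map(int, group)) is the identity on ints)
def aFmtGroup (g : List Int) : String :=
  if g.headD 0 = g.getLastD 0 then PySem.Int.toStr (g.headD 0)
  else PySem.Int.toStr (g.headD 0) ++ "-" ++ PySem.Int.toStr (g.getLastD 0)

def aGroupRanges (data : List String) : List String :=
  if data.length < 2 ∨ 0 < (data.filter (fun s => !PySem.Str.strIsdigit s)).length then data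
  else
    let nums := data.map (fun s => (PySem.Int.ofStr? s).getD 0)  -- int(s); never none here
    (aGroups (aEnum 0 nums)).map aFmtGroup

def check_make_list_into_text (var : List String) : String :=
  let var' := aGroupRanges var
  let text := PySem.Str.join ", " var'
  if PySem.Str.strip text = "" then " - " else text

-- ===== PORT B =====

def bFmt (start e : Int) : String :=
  if start = e then PySem.Int.toStr start
  else PySem.Int.toStr start ++ "-" ++ PySem.Int.toStr e

def bGroupRanges (data : List String) : List String :=
  if data.length < 2 ∨ ¬ (data.all (fun s => PySem.Str.strIsdigit s) = true) then data
  else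
    match data.map (fun s => (PySem.Int.ofStr? s).getD 0) with   -- int(s); never none here
    | [] => []                                                   -- unreachable: length ≥ 2
    | n :: rest =>
      let r := rest.foldl
        (fun (acc : List String × Int × Int) v =>
          if v = acc.2.2 + 1 then (acc.1, acc.2.1, v)
          else (acc.1 ++ [bFmt acc.2.1 acc.2.2], v, v)) ([], n, n)
      r.1 ++ [bFmt r.2.1 r.2.2]

def check_make_list_into_text_alt (var : List String) : String :=
  let text := PySem.Str.join ", " (bGroupRanges var)
  if PySem.Str.strip text = "" then " - " else text

-- ===== PRECONDITION & SPEC =====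
def Spec_check_make_list_into_text (var : List String) (out : String) : Prop := out = check_make_list_into_text_alt var
instance (var : List String) (out : String) : Decidable (Spec_check_make_list_into_text var out) := by unfold Spec_check_make_list_into_text; infer_instance

-- ===== CLAIM (what is proved, stated in full; the proofs are below) =====
def Claim_equal_check_make_list_into_text : Prop := ∀ (var : List String), Dom_check_make_list_into_text var → Spec_check_make_list_into_text var (check_make_list_into_text var)

-- ===== LEMMAS AND PROOFS =====

-- index-free characterisation of aGroups ∘ aEnum:
-- successive keys are equal iff the value rises by exactly 1
def grp : Int → List Int → List (List Int)
  | v, [] => [[v]]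
  | v, w :: l =>
    match grp w l with
    | [] => [[v]]
    | g :: gs => if w = v + 1 then (v :: g) :: gs else [v] :: g :: gs

-- recursive form of B's flush loop
def bGo : Int → Int → List Int → List String
  | s, prev, [] => [bFmt s prev]
  | s, prev, w :: l => if w = prev + 1 then bGo s w l else bFmt s prev :: bGo w w l

lemma aGroups_aEnum (l : List Int) : ∀ (i v : Int), aGroups (aEnum i (v :: l)) = grp v l := by
  induction l with
  | nil => intro i v; simp [aEnum, aGroups, grp]
  | cons w l ih =>
    intro i v
    have h : aEnum i (v :: w :: l) = (i, v) :: aEnum (i + 1) (w :: l) := by simp [aEnum]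
    rw [h]
    have h2 : aEnum (i + 1) (w :: l) = (i + 1, w) :: aEnum (i + 2) l := by
      simp [aEnum]; ring_nf
    rw [h2, aGroups, ← h2, ih (i + 1) w, grp]
    have hk : (i - v = i + 1 - w) = (w = v + 1) := by
      apply propext; omega
    cases grp w l with
    | nil => simp
    | cons g gs => simp [hk]

lemma grp_shape (l : List Int) : ∀ (v : Int), ∃ t gs, grp v l = (v :: t) :: gs := by
  induction l with
  | nil => intro v; exact ⟨[], [], rfl⟩
  | cons w l ih =>
    intro v
    obtain ⟨t, gs, h⟩ := ih w
    by_cases hw : w = v + 1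
    · subst hw
      exact ⟨(v + 1) :: t, gs, by simp [grp, h]⟩
    · exact ⟨[], (w :: t) :: gs, by simp [grp, h, hw]⟩

lemma getLastD_cons_cons (a b : Int) (l : List Int) (d : Int) :
    ((a :: b :: l).getLastD d) = (b :: l).getLastD d := by
  simp

lemma aFmtGroup_cons (w : Int) (t : List Int) :
    aFmtGroup (w :: t) = bFmt w ((w :: t).getLastD 0) := by
  simp [aFmtGroup, bFmt]

lemma grp_fmt (l : List Int) : ∀ (v s : Int) (t : List Int) (gs : List (List Int)),
    grp v l = (v :: t) :: gs →
    bFmt s ((v :: t).getLastD 0) :: gs.map aFmtGroup = bGo s v l := by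
  induction l with
  | nil =>
    intro v s t gs h
    simp only [grp] at h
    injection h with h1 h2
    injection h1 with _ h1'
    subst h2; subst h1'
    simp [bGo]
  | cons w l ih =>
    intro v s t gs h
    obtain ⟨t', gs', h'⟩ := grp_shape l w
    by_cases hw : w = v + 1
    · subst hw
      have hgr : grp v ((v + 1) :: l) = (v :: (v + 1) :: t') :: gs' := by
        simp [grp, h']
      rw [hgr] at h
      injection h with h1 h2
      injection h1 with _ h1'
      subst h2
      rw [← h1', getLastD_cons_cons, ih (v + 1) s t' gs' h']
      simp [bGo]
    · have hgr : grp v (w :: l) = [v] :: (w :: t') :: gs' := by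
        simp [grp, h', hw]
      rw [hgr] at h
      injection h with h1 h2
      injection h1 with _ h1'
      subst h2
      have ht : t = [] := by simpa using h1'.symm
      subst ht
      rw [List.map_cons, aFmtGroup_cons, ih w w t' gs' h']
      simp [bGo, hw]
  
lemma grp_map_fmt (l : List Int) (v : Int) :
    (grp v l).map aFmtGroup = bGo v v l := by
  obtain ⟨t, gs, h⟩ := grp_shape l v
  rw [h, List.map_cons, aFmtGroup_cons]
  exact grp_fmt l v v t gs h

lemma foldl_bGo (l : List Int) : ∀ (acc : List String) (s prev : Int),
    (let r := l.foldl
        (fun (acc : List String × Int × Int) v =>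
          if v = acc.2.2 + 1 then (acc.1, acc.2.1, v)
          else (acc.1 ++ [bFmt acc.2.1 acc.2.2], v, v)) (acc, s, prev)
     r.1 ++ [bFmt r.2.1 r.2.2]) = acc ++ bGo s prev l := by
  induction l with
  | nil => intro acc s prev; simp [bGo]
  | cons w l ih =>
    intro acc s prev
    simp only [List.foldl_cons, bGo]
    by_cases hw : w = prev + 1
    · rw [if_pos hw, if_pos hw]
      exact ih acc s w
    · rw [if_neg hw, if_neg hw]
      rw [ih (acc ++ [bFmt s prev]) w w]
      simp

lemma guard_iff (data : List String) :
    (data.length < 2 ∨ 0 < (data.filter (fun s => !PySem.Str.strIsdigit s)).length) ↔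
    (data.length < 2 ∨ ¬ (data.all (fun s => PySem.Str.strIsdigit s) = true)) := by
  apply or_congr Iff.rfl
  rw [List.length_pos_iff]
  constructor
  · intro h hall
    obtain ⟨x, hx⟩ := List.exists_mem_of_ne_nil _ h
    rw [List.mem_filter] at hx
    rw [List.all_eq_true] at hall
    have h1 := hall x hx.1
    have h2 := hx.2
    rw [Bool.not_eq_true'] at h2
    rw [h1] at h2
    exact absurd h2 (by simp)
  · intro h
    rw [List.all_eq_true] at h
    simp only [not_forall, exists_prop] at h
    obtain ⟨x, hx, hnd⟩ := h
    rw [Bool.not_eq_true] at hnd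
    intro hnil
    have hm : x ∈ data.filter (fun s => !PySem.Str.strIsdigit s) :=
      List.mem_filter.mpr ⟨hx, by rw [hnd]; rfl⟩
    rw [hnil] at hm
    exact absurd hm (by simp)
    
lemma ranges_eq (data : List String) : aGroupRanges data = bGroupRanges data := by
  unfold aGroupRanges bGroupRanges
  by_cases hg : data.length < 2 ∨ 0 < (data.filter (fun s => !PySem.Str.strIsdigit s)).length
  · rw [if_pos hg, if_pos ((guard_iff data).mp hg)]
  · rw [if_neg hg, if_neg (fun h => hg ((guard_iff data).mpr h))]
    have hlen : 2 ≤ data.length := by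
      by_contra h; exact hg (Or.inl (by omega))
    cases data with
    | nil => simp at hlen
    | cons d ds =>
      simp only [List.map_cons]
      rw [aGroups_aEnum, grp_map_fmt]
      exact (foldl_bGo _ [] _ _).symm

-- ===== VERDICT (by name: the statement is the Claim_ definition above) =====
theorem check_make_list_into_text_spec : Claim_equal_check_make_list_into_text := by
  intro var _
  unfold Spec_check_make_list_into_text check_make_list_into_text check_make_list_into_text_alt
  rw [ranges_eq]
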